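-- pv_equiv track=rewrite | github.com/suralmasha/RuTranscript | src/tools/stress_tools.py | replace_stress_before
-- ===== SOURCE A (Python) =====
-- def replace_stress_before(text):
--     if isinstance(text, str):
--         text = list(text)
--
--     text_copy = text.copy()
--     for i, char in enumerate(text):
--         if char == '+':
--             text_copy.pop(i)
--             text_copy.insert(i - 1, '+')
--     return text_copy
-- ===== SOURCE B (Python) =====
-- def replace_stress_before(text):
--     chars = list(text)
--     for i in range(1, len(chars)):
--         if text[i] == '+':
--             chars[i - 1], chars[i] = '+', chars[i - 1]
--     return chars
-- ===== Notes on version B (the rewrite author's own statement) =====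
-- stated objective: alternative
-- what changed: A edits a copy with pop(i)/insert(i-1) list surgery for every '+' (each a linear shift); B does one pass of in-place index swaps chars[i-1], chars[i] = '+', chars[i-1], never resizing the list.
-- intended difference: On texts of length >= 3 that start with '+' and have a non-'+' character strictly inside, A's insert(-1) wraps around and drops the leading '+' just before the LAST character (A('+ab') = ['a','+','b']); B leaves a leading '+' where it is (['+','a','b']), the intended behaviour since there is no position to its left. — e.g. on replace_stress_before("+ab"): A returns ["a", "+", "b"], B returns ["+", "a", "b"]
import Mathlib
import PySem

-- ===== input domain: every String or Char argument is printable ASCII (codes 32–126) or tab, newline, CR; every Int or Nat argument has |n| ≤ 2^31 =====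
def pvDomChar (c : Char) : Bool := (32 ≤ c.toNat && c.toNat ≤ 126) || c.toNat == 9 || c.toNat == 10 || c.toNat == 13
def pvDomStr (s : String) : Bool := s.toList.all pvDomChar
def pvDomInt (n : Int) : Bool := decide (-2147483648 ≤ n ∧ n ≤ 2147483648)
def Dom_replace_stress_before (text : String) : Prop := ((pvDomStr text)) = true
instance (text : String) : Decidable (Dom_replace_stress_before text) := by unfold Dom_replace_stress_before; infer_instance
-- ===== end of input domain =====

-- B replaces A's per-'+' pop/insert list editing by a single pass of in-place index
-- swaps (objective: alternative); on texts that start with '+' and have a non-'+' char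
-- strictly inside, A's insert(-1) wraparound misplaces the leading '+' and B differs (D_ below).

-- ===== PORT A =====
-- literal transliteration of A: copy the list, then for each i with text[i] == '+',
-- text_copy.pop(i); text_copy.insert(i - 1, '+').  pop? can never be none here
-- (the copy keeps length len(text) and i < len(text)); the `none => r` arm is dead.
def replace_stress_before (text : String) : List String :=
  let t : List String := text.toList.map (fun c => String.ofList [c])
  (PySem.List.enumerate t 0).foldl
    (fun r p =>
      if p.2 = "+" then
        match PySem.List.pop? r p.1 with
        | some (_, r') => PySem.List.insert r' (p.1 - 1) "+"
        | none => r
      else r) t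

-- ===== PORT B =====
-- transliteration of Source B: copy the list, then one pass i = 1 .. n-1 of in-place swaps.
def replace_stress_before_alt (text : String) : List String :=
  let t : List String := text.toList.map (fun c => String.ofList [c])
  (PySem.List.pyRange 1 (t.length : Int) 1).foldl
    (fun r i =>
      if PySem.List.pyGet? t i = some "+" then
        let prev := PySem.List.pyGetD r (i - 1) "+"
        PySem.List.pySetD (PySem.List.pySetD r (i - 1) "+") i prev
      else r) t

-- ===== PRECONDITION & SPEC =====
-- On texts of length ≥ 3 that start with '+' and have a non-'+' character strictly
-- inside, A's insert(-1) wraps around and drops the leading '+' just before the LAST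
-- character (A "+ab" = ["a","+","b"]); B leaves a leading '+' where it is
-- (["+","a","b"]), the intended behaviour since there is no position to its left.
def D_replace_stress_before (text : String) : Prop :=
  3 ≤ text.toList.length ∧ text.toList.head? = some '+' ∧
    ∃ c ∈ (text.toList.drop 1).dropLast, c ≠ '+'
instance (text : String) : Decidable (D_replace_stress_before text) := by
  unfold D_replace_stress_before; infer_instance

def Spec_replace_stress_before (text : String) (out : List String) : Prop :=
  ¬ D_replace_stress_before text → out = replace_stress_before_alt text
instance (text : String) (out : List String) : Decidable (Spec_replace_stress_before text out) := by
  unfold Spec_replace_stress_before; infer_instance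

def pvDiffWitness_replace_stress_before : String := "+ab"
def pvDiffWitnessOut_replace_stress_before : (List String) × (List String) :=
  (["a", "+", "b"], ["+", "a", "b"])

-- ===== CLAIM (what is proved, stated in full; the proofs are below) =====
def Claim_unchanged_replace_stress_before : Prop :=
  ∀ (text : String), Dom_replace_stress_before text →
    Spec_replace_stress_before text (replace_stress_before text)
def Claim_changed_replace_stress_before : Prop :=
  Dom_replace_stress_before (pvDiffWitness_replace_stress_before) ∧
  D_replace_stress_before (pvDiffWitness_replace_stress_before) ∧
  replace_stress_before (pvDiffWitness_replace_stress_before) = pvDiffWitnessOut_replace_stress_before.1 ∧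
  replace_stress_before_alt (pvDiffWitness_replace_stress_before) = pvDiffWitnessOut_replace_stress_before.2 ∧
  pvDiffWitnessOut_replace_stress_before.1 ≠ pvDiffWitnessOut_replace_stress_before.2

-- ===== LEMMAS AND PROOFS =====

-- the common effect of one '+'-step at index i ≥ 1 on a list r (length preserved)
def pvStep (r : List String) (i : Nat) : List String :=
  (r.set (i - 1) "+").set i (r.getD (i - 1) "+")

lemma pvStep_length (r : List String) (i : Nat) : (pvStep r i).length = r.length := by
  simp [pvStep]

lemma pvStep_take_drop : ∀ (i : Nat) (r : List String), 1 ≤ i → i < r.length →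
    (r.eraseIdx i).take (i-1) ++ "+" :: (r.eraseIdx i).drop (i-1) = pvStep r i := by
  intro i
  induction i with
  | zero => omega
  | succ k ih =>
    intro r h1 h2
    match r, k with
    | a :: c :: rest, 0 => simp [pvStep]
    | a :: r', k + 1 =>
      have hlen : k + 1 < r'.length := by simpa using h2
      have := ih r' (by omega) hlen
      simp only [pvStep, List.eraseIdx_cons_succ, List.set_cons_succ, List.getD_cons_succ,
        Nat.add_sub_cancel] at *
      simp [List.take_succ_cons, List.drop_succ_cons, this]

-- A's pop/insert at index i (1 ≤ i < r.length) is exactly pvStep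
lemma stepA_eq_pvStep (r : List String) (i : Nat) (h1 : 1 ≤ i) (h2 : i < r.length) :
    PySem.List.insert (r.eraseIdx i) ((i : Int) - 1) "+" = pvStep r i := by
  have hc : ((i : Int) - 1) = ((i - 1 : Nat) : Int) := by omega
  rw [hc, PySem.List.insert_natCast _ _ _ (by simp [List.length_eraseIdx_of_lt h2]; omega)]
  exact pvStep_take_drop i r h1 h2

-- B's swap body at index i (1 ≤ i) is exactly pvStep
lemma stepB_eq_pvStep (r : List String) (i : Nat) (h1 : 1 ≤ i) :
    PySem.List.pySetD (PySem.List.pySetD r ((i : Int) - 1) "+") (i : Int)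
      (PySem.List.pyGetD r ((i : Int) - 1) "+") = pvStep r i := by
  have hc : ((i : Int) - 1) = ((i - 1 : Nat) : Int) := by omega
  rw [hc, PySem.List.pyGetD_natCast]
  simp [pvStep]

-- the shared remainder of both loops (indices ≥ 1), as a structural recursion over the tail
def pvGo (r : List String) (xs : List String) (i : Nat) : List String :=
  match xs with
  | [] => r
  | c :: cs => pvGo (if c = "+" then pvStep r i else r) cs (i + 1)

lemma pvGo_A : ∀ (xs : List String) (s : Nat) (r : List String), 1 ≤ s →
    s + xs.length ≤ r.length →
    (PySem.List.enumerate xs (s : Int)).foldl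
      (fun r p =>
        if p.2 = "+" then
          match PySem.List.pop? r p.1 with
          | some (_, r') => PySem.List.insert r' (p.1 - 1) "+"
          | none => r
        else r) r = pvGo r xs s := by
  intro xs
  induction xs with
  | nil => intro s r _ _; simp [PySem.List.enumerate_nil, pvGo]
  | cons c cs ih =>
    intro s r hs hlen
    rw [PySem.List.enumerate_cons, List.foldl_cons]
    have hslt : s < r.length := by simp at hlen; omega
    have hpop : PySem.List.pop? r (s : Int) = some (r[s], r.eraseIdx s) :=
      PySem.List.pop?_natCast (xs := r) s hslt
    have hcast : ((s : Int) + 1) = (((s + 1 : Nat)) : Int) := by omega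
    by_cases hc : c = "+"
    · simp only [hc, hpop, stepA_eq_pvStep r s hs hslt, hcast, pvGo, if_true]
      rw [ih (s + 1) (pvStep r s) (by omega) (by rw [pvStep_length]; simp at hlen ⊢; omega)]
    · simp only [hcast, pvGo, if_neg hc]
      exact ih (s + 1) r (by omega) (by simp at hlen ⊢; omega)

lemma pvGo_B (t : List String) : ∀ (m s : Nat) (r : List String), 1 ≤ s →
    s + m = t.length →
    (PySem.List.pyRange (s : Int) (t.length : Int) 1).foldl
      (fun r i =>
        if PySem.List.pyGet? t i = some "+" then
          PySem.List.pySetD (PySem.List.pySetD r (i - 1) "+") i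
            (PySem.List.pyGetD r (i - 1) "+")
        else r) r = pvGo r (t.drop s) s := by
  intro m
  induction m with
  | zero =>
    intro s r _ hm
    have : PySem.List.pyRange (s : Int) (t.length : Int) 1 = [] := by
      rw [PySem.List.pyRange_one]
      have : ((t.length : Int) - s).toNat = 0 := by omega
      simp [this]
    rw [this, List.foldl_nil, List.drop_of_length_le (by omega), pvGo]
  | succ m ih =>
    intro s r hs hm
    have hslt : s < t.length := by omega
    rw [PySem.List.pyRange_one_cons (by exact_mod_cast hslt), List.foldl_cons,
      List.drop_eq_getElem_cons hslt, pvGo]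
    have hget : PySem.List.pyGet? t (s : Int) = some t[s] := by
      rw [PySem.List.pyGet?_natCast]; simp [hslt]
    have hcast : ((s : Int) + 1) = (((s + 1 : Nat)) : Int) := by omega
    by_cases hc : t[s] = "+"
    · rw [if_pos (by rw [hget, hc]), stepB_eq_pvStep r s hs, if_pos hc, hcast]
      exact ih (s + 1) _ (by omega) (by omega)
    · rw [if_neg (by rw [hget]; simpa using hc), if_neg hc, hcast]
      exact ih (s + 1) r (by omega) (by omega)

-- Python's copy.pop(0); copy.insert(-1, '+') in take/drop form
lemma ins_neg_one (xs : List String) (v : String) :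
    PySem.List.insert xs (-1) v = xs.take (xs.length - 1) ++ v :: xs.drop (xs.length - 1) := by
  have h : (max (-1 + (xs.length : Int)) 0).toNat = xs.length - 1 := by omega
  simp [PySem.List.insert, PySem.List.sliceIndices, h]

-- mid all "+" commutes past a prepended "+"
lemma all_plus_comm : ∀ (mid rest : List String), (∀ x ∈ mid, x = "+") →
    mid ++ "+" :: rest = "+" :: mid ++ rest := by
  intro mid
  induction mid with
  | nil => intro rest _; rfl
  | cons a m ih =>
    intro rest h
    have ha : a = "+" := h a (by simp)
    have := ih rest (fun x hx => h x (by simp [hx]))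
    simp [ha, this]

-- when everything before the last element is "+", A's wraparound insert is a no-move
lemma all_plus_insert (cs : List String) (h : ∀ x ∈ cs.dropLast, x = "+") :
    PySem.List.insert cs (-1) "+" = "+" :: cs := by
  match cs with
  | [] => decide
  | d :: cs' =>
    obtain ⟨l, x, hlx⟩ : ∃ l x, d :: cs' = l ++ [x] :=
      ⟨(d :: cs').dropLast, (d :: cs').getLast (by simp),
        (List.dropLast_append_getLast (by simp)).symm⟩
    have hall : ∀ y ∈ l, y = "+" := by
      intro y hy; exact h y (by rw [hlx, List.dropLast_concat]; exact hy)
    rw [ins_neg_one, hlx]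
    have hL : (l ++ [x]).length - 1 = l.length := by simp
    rw [hL, List.take_left, List.drop_left, all_plus_comm l [x] hall]
    simp

-- ===== VERDICT (by name: the statement is the Claim_ definition above) =====
theorem replace_stress_before_spec : Claim_unchanged_replace_stress_before := by
  intro text _ hND
  unfold replace_stress_before replace_stress_before_alt
  cases hl : text.toList with
  | nil => simp [PySem.List.enumerate_nil, PySem.List.pyRange]
  | cons c0 ls =>
    simp only [List.map_cons]
    set f : Char → String := fun c => String.ofList [c] with hf
    set cs : List String := ls.map f with hcs
    have hB := pvGo_B (f c0 :: cs) cs.length 1 (f c0 :: cs) le_rfl (by simp [Nat.add_comm])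
    simp only [Nat.cast_one, List.drop_one, List.tail_cons] at hB
    rw [show (String.ofList [c0] : String) = f c0 from rfl, hB]
    rw [PySem.List.enumerate_cons, List.foldl_cons]
    have e01 : (0 : Int) + 1 = ((1 : Nat) : Int) := by norm_num
    by_cases hc : f c0 = "+"
    · -- leading '+': A does pop(0); insert(-1,'+'); outside D_ this is the identity move
      have hc0 : c0 = '+' := by
        have := congrArg String.toList hc
        simpa [hf] using this
      have hall : ∀ x ∈ cs.dropLast, x = "+" := by
        intro x hx
        rw [hcs, ← List.map_dropLast] at hx
        obtain ⟨ch, hch, rfl⟩ := List.mem_map.mp hx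
        by_cases hlen3 : 3 ≤ text.toList.length
        · have hne : ¬ (∃ c ∈ (text.toList.drop 1).dropLast, c ≠ '+') := by
            intro hex
            exact hND ⟨hlen3, by simp [hl, hc0], hex⟩
          push Not at hne
          have : ch = '+' := hne ch (by simp [hl, hch])
          simp [hf, this, String.ofList]
          rfl
        · -- short text: ls has length ≤ 1, so dropLast is empty
          exfalso
          have : ls.length ≤ 1 := by simp [hl] at hlen3 ⊢; omega
          have hnil : ls.dropLast = [] := by
            cases ls with
            | nil => rfl
            | cons a l' => cases l' with
              | nil => rfl
              | cons b l'' => simp at this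
          rw [hnil] at hch
          exact (List.not_mem_nil).elim hch
      simp only [if_pos hc, PySem.List.pop?_zero_cons]
      rw [show (0 : Int) - 1 = -1 by norm_num, all_plus_insert cs hall, hc, e01]
      exact pvGo_A cs 1 ("+" :: cs) le_rfl (by simp only [List.length_cons]; omega)
    · rw [if_neg hc, e01]
      exact pvGo_A cs 1 (f c0 :: cs) le_rfl (by simp only [List.length_cons]; omega)

theorem replace_stress_before_changed : Claim_changed_replace_stress_before := by
  unfold Claim_changed_replace_stress_before
  exact ⟨by decide, ⟨by decide, by decide, ⟨'a', by decide, by decide⟩⟩, by decide, by decide,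
    by decide⟩
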